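-- pv_equiv track=rewrite | github.com/Zahu2018/Plante-medicinale | DATE/Site_plante_medicinale/tabel_mare.py | incearca
-- ===== SOURCE A (Python) =====
-- cuvinte = ['Denumire ştiinţifică', 'Denumire populară', 'Sinonime ştiinţifice', 'Alte denumiri populare', 'Regnul', 'Încrengătura', 'Subîncrengătura', 'Clasa', 'Subclasa', 'Ordinul', 'Familia', 'Subfamilia', 'Caractere morfologice', 'Ecologie şi răspândire', 'Organe utilizate','Compoziţia chimică','Acţiune terapeutică', 'Importanţa','Utilizare','Alte utilizări','Toxicitate','Contraindicaţii','Precauţii şi reacţii adverse','Dozare','Supradozare','Forme farmaceutice','Conservare','Cultivare','Mod de cultivare','Recoltare (organe şi mod)','Valorificare', 'Alte specii'] # = 32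
--
-- def incearca(tp, k): # tp=text_planta;
--     try:
--         ku2 = cuvinte[k+1]
--         if ku2 in tp:
--
--             return ku2
--
--         else:
--             k += 1
-- ########################################################
-- #            FUNCTIE RECURSIVA !!!                     #
--             return incearca(tp, k) # not just incearca #
-- ########################################################
--     except IndexError:
--
--         return "Final"
-- ===== SOURCE B (Python) =====
-- cuvinte = ['Denumire ştiinţifică', 'Denumire populară', 'Sinonime ştiinţifice', 'Alte denumiri populare', 'Regnul', 'Încrengătura', 'Subîncrengătura', 'Clasa', 'Subclasa', 'Ordinul', 'Familia', 'Subfamilia', 'Caractere morfologice', 'Ecologie şi răspândire', 'Organe utilizate','Compoziţia chimică','Acţiune terapeutică', 'Importanţa','Utilizare','Alte utilizări','Toxicitate','Contraindicaţii','Precauţii şi reacţii adverse','Dozare','Supradozare','Forme farmaceutice','Conservare','Cultivare','Mod de cultivare','Recoltare (organe şi mod)','Valorificare', 'Alte specii'] # = 32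
--
-- def incearca(tp, k): # tp=text_planta;
--     return next((w for w in cuvinte[k+1:] if w in tp), "Final")
-- ===== Notes on version B (the rewrite author's own statement) =====
-- stated objective: idiomatic
-- what changed: Replaced the try/except tail recursion with a single idiomatic next() over the slice cuvinte[k+1:], returning the first keyword that occurs in tp.
-- intended difference: For k < -1, when tp contains some keyword but none occurs in the part A scans before its negative index wraps, A wraps around Python's negative indexing and returns a keyword from the front of the list (or 'Final' via IndexError for k < -33), while B scans the slice cuvinte[k+1:] and returns its first match or 'Final' -- the slice semantics, not the accidental wraparound, is the intended reading of 'first keyword after position k'. — e.g. on incearca("Regnul", -2): A returns "Regnul", B returns "Final"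
import Mathlib
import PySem

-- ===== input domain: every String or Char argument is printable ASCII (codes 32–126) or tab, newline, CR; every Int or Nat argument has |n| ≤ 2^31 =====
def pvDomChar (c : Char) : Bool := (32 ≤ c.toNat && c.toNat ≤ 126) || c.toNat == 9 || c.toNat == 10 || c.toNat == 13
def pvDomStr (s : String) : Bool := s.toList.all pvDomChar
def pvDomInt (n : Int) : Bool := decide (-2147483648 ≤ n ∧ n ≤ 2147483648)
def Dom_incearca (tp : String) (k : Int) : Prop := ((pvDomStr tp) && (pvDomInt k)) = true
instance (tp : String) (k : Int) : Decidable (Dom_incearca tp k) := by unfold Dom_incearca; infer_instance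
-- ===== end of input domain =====

-- B replaces A's try/except tail recursion by next() over the slice cuvinte[k+1:] (idiomatic);
-- for k < -1 B follows slice semantics instead of A's negative-index wraparound (see D_).

-- module constant: the keyword table (32 entries)
def cuvinte : List String := ["Denumire ştiinţifică", "Denumire populară", "Sinonime ştiinţifice", "Alte denumiri populare", "Regnul", "Încrengătura", "Subîncrengătura", "Clasa", "Subclasa", "Ordinul", "Familia", "Subfamilia", "Caractere morfologice", "Ecologie şi răspândire", "Organe utilizate", "Compoziţia chimică", "Acţiune terapeutică", "Importanţa", "Utilizare", "Alte utilizări", "Toxicitate", "Contraindicaţii", "Precauţii şi reacţii adverse", "Dozare", "Supradozare", "Forme farmaceutice", "Conservare", "Cultivare", "Mod de cultivare", "Recoltare (organe şi mod)", "Valorificare", "Alte specii"]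

-- ===== PORT A =====
-- literal port of A: try cuvinte[k+1] (pyGet?; none = IndexError → "Final"), substring test, tail recursion with k+1
def incearca (tp : String) (k : Int) : String :=
  match h : PySem.List.pyGet? cuvinte (k + 1) with
  | none => "Final"
  | some ku2 => if PySem.Str.isIn ku2 tp then ku2 else incearca tp (k + 1)
termination_by (33 - k).toNat
decreasing_by
  have hr : PySem.Raise.InRange cuvinte.length (k + 1) := by
    by_contra hc
    rw [(PySem.List.pyGet?_eq_none_iff _ _).mpr hc] at h
    simp at h
  have h32 : k + 1 < (cuvinte.length : Int) := hr.2
  simp only [cuvinte, List.length] at h32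
  omega

-- ===== PORT B =====
-- next((w for w in cuvinte[k+1:] if w in tp), "Final"): first-match scan of the slice
def firstMatch (tp : String) : List String → String
  | [] => "Final"
  | w :: rest => if PySem.Str.isIn w tp then w else firstMatch tp rest

def incearca_alt (tp : String) (k : Int) : String :=
  firstMatch tp (PySem.List.slice cuvinte (some (k + 1)) none)

-- ===== PRECONDITION & SPEC =====
-- For k < -1, when tp contains some keyword but none occurs in the tail A scans before its
-- negative index wraps (cuvinte.drop (33+k) for -33 ≤ k, nothing for k < -33), A returns a
-- wrapped-around keyword (or "Final" via IndexError for k < -33) while B scans the slice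
-- cuvinte[k+1:]; the slice semantics is the intended reading of "first keyword after position k".
def D_incearca (tp : String) (k : Int) : Prop :=
  k < -1 ∧ (∃ w ∈ cuvinte, PySem.Str.isIn w tp = true) ∧
    (k < -33 ∨ ∀ w ∈ cuvinte.drop (33 + k).toNat, PySem.Str.isIn w tp = false)
instance (tp : String) (k : Int) : Decidable (D_incearca tp k) := by unfold D_incearca; infer_instance

def Spec_incearca (tp : String) (k : Int) (out : String) : Prop := ¬ D_incearca tp k → out = incearca_alt tp k
instance (tp : String) (k : Int) (out : String) : Decidable (Spec_incearca tp k out) := by unfold Spec_incearca; infer_instance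

def pvDiffWitness_incearca : String × Int := ("Regnul", -2)
def pvDiffWitnessOut_incearca : String × String := ("Regnul", "Final")

-- ===== CLAIM (what is proved, stated in full; the proofs are below) =====
def Claim_unchanged_incearca : Prop := ∀ (tp : String) (k : Int), Dom_incearca tp k → Spec_incearca tp k (incearca tp k)
def Claim_changed_incearca : Prop := Dom_incearca (pvDiffWitness_incearca.1) (pvDiffWitness_incearca.2) ∧ D_incearca (pvDiffWitness_incearca.1) (pvDiffWitness_incearca.2) ∧ incearca (pvDiffWitness_incearca.1) (pvDiffWitness_incearca.2) = pvDiffWitnessOut_incearca.1 ∧ incearca_alt (pvDiffWitness_incearca.1) (pvDiffWitness_incearca.2) = pvDiffWitnessOut_incearca.2 ∧ pvDiffWitnessOut_incearca.1 ≠ pvDiffWitnessOut_incearca.2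
def Claim_exact_incearca : Prop := ∀ (tp : String) (k : Int), Dom_incearca tp k → D_incearca tp k → incearca tp k ≠ incearca_alt tp k

-- ===== LEMMAS AND PROOFS =====

lemma cuvinte_len : cuvinte.length = 32 := by decide

-- first-match with an arbitrary default (proof helper characterising A's wraparound)
def fmD (tp : String) (d : String) : List String → String
  | [] => d
  | w :: rest => if PySem.Str.isIn w tp then w else fmD tp d rest

lemma fm_eq_fmD (tp : String) (l : List String) : firstMatch tp l = fmD tp "Final" l := by
  induction l with
  | nil => rfl
  | cons w rest ih => simp only [firstMatch, fmD, ih]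

lemma fmD_none (tp d : String) (l : List String)
    (h : ∀ w ∈ l, PySem.Str.isIn w tp = false) : fmD tp d l = d := by
  induction l with
  | nil => rfl
  | cons w rest ih =>
    have hw := h w List.mem_cons_self
    simp only [fmD]
    rw [if_neg (by rw [hw]; simp), ih (fun x hx => h x (List.mem_cons_of_mem _ hx))]

lemma fmD_mem (tp d : String) (l : List String)
    (h : ∃ w ∈ l, PySem.Str.isIn w tp = true) : fmD tp d l ∈ l := by
  induction l with
  | nil => simp at h
  | cons w rest ih =>
    simp only [fmD]
    by_cases hw : PySem.Str.isIn w tp = true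
    · rw [if_pos hw]; exact List.mem_cons_self
    · rw [if_neg hw]
      rcases h with ⟨x, hx, hxin⟩
      rcases List.mem_cons.mp hx with rfl | hx'
      · exact absurd hxin hw
      · exact List.mem_cons_of_mem _ (ih ⟨x, hx', hxin⟩)

lemma fmD_irrel (tp d d' : String) (l : List String)
    (h : ∃ w ∈ l, PySem.Str.isIn w tp = true) : fmD tp d l = fmD tp d' l := by
  induction l with
  | nil => simp at h
  | cons w rest ih =>
    simp only [fmD]
    by_cases hw : PySem.Str.isIn w tp = true
    · rw [if_pos hw, if_pos hw]
    · rw [if_neg hw, if_neg hw]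
      rcases h with ⟨x, hx, hxin⟩
      rcases List.mem_cons.mp hx with rfl | hx'
      · exact absurd hxin hw
      · exact ih ⟨x, hx', hxin⟩

-- A on a nonnegative start s = k+1 is a plain first-match scan of cuvinte.drop s
lemma incearca_nonneg (tp : String) :
    ∀ (s : Nat), s ≤ 32 → incearca tp ((s : Int) - 1) = firstMatch tp (cuvinte.drop s) := by
  intro s
  induction hm : (32 - s) generalizing s with
  | zero =>
    intro h2
    have hs : s = 32 := by omega
    subst hs
    have hnone : PySem.List.pyGet? cuvinte ((32 : Int) - 1 + 1) = none := by
      rw [PySem.List.pyGet?_eq_none_iff]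
      intro hr
      have := hr.2
      rw [cuvinte_len] at this
      norm_num at this
    rw [incearca]
    split
    · have : cuvinte.drop 32 = [] := by decide
      rw [this]; rfl
    · next heq => rw [show ((32:Nat) : Int) - 1 + 1 = (32:Int) - 1 + 1 by norm_num, hnone] at heq; exact absurd heq (by simp)
  | succ m ih =>
    intro h2
    have hlt : s < 32 := by omega
    have hg : PySem.List.pyGet? cuvinte ((s : Int) - 1 + 1) = some (cuvinte[s]'(by rw [cuvinte_len]; omega)) := by
      rw [show (s : Int) - 1 + 1 = (s : Int) by ring]
      rw [PySem.List.pyGet?_natCast]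
      exact List.getElem?_eq_getElem _
    have hdrop : cuvinte.drop s = cuvinte[s]'(by rw [cuvinte_len]; omega) :: cuvinte.drop (s + 1) := by
      exact List.drop_eq_getElem_cons (by rw [cuvinte_len]; omega)
    rw [incearca]
    split
    · next heq => rw [hg] at heq; exact absurd heq (by simp)
    · next ku2 heq =>
      rw [hg] at heq
      cases heq
      rw [hdrop]
      simp only [firstMatch]
      by_cases hin : PySem.Str.isIn (cuvinte[s]'(by rw [cuvinte_len]; omega)) tp = true
      · rw [if_pos hin, if_pos hin]
      · rw [if_neg hin, if_neg hin]
        have := ih (s + 1) (by omega) (by omega)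
        rw [show (s : Int) - 1 + 1 = ((s + 1 : Nat) : Int) - 1 by push_cast; ring]
        exact this

-- A on a negative start -m (1 ≤ m ≤ 32): scan the wrapped tail, then fall back to a full scan
lemma incearca_neg (tp : String) :
    ∀ (m : Nat), m ≤ 32 → incearca tp (-(m : Int) - 1) =
      fmD tp (firstMatch tp cuvinte) (cuvinte.drop (32 - m)) := by
  intro m
  induction m with
  | zero =>
    intro _
    have h0 := incearca_nonneg tp 0 (by omega)
    norm_num at h0 ⊢
    have hnil : cuvinte.drop 32 = [] := by decide
    rw [h0, hnil]
    rfl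
  | succ m ih =>
    intro h2
    have hmlen : m + 1 ≤ cuvinte.length := by rw [cuvinte_len]; omega
    have hlt : 32 - (m + 1) < cuvinte.length := by rw [cuvinte_len]; omega
    have hg : PySem.List.pyGet? cuvinte (-((m + 1 : Nat) : Int) - 1 + 1) =
        some (cuvinte[32 - (m + 1)]'hlt) := by
      rw [show -((m + 1 : Nat) : Int) - 1 + 1 = -(((m + 1 : Nat)) : Int) by ring]
      rw [PySem.List.pyGet?_neg_natCast cuvinte (m + 1) (by omega) hmlen]
      simp only [cuvinte_len]
      exact List.getElem?_eq_getElem _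
    have hdrop : cuvinte.drop (32 - (m + 1)) =
        cuvinte[32 - (m + 1)]'hlt :: cuvinte.drop (32 - m) := by
      rw [List.drop_eq_getElem_cons hlt]
      have h32 : 32 - (m + 1) + 1 = 32 - m := by omega
      rw [h32]
    rw [incearca]
    split
    · next heq => rw [hg] at heq; exact absurd heq (by simp)
    · next ku2 heq =>
      rw [hg] at heq
      cases heq
      rw [hdrop]
      simp only [fmD]
      by_cases hin : PySem.Str.isIn (cuvinte[32 - (m + 1)]'hlt) tp = true
      · rw [if_pos hin, if_pos hin]
      · rw [if_neg hin, if_neg hin]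
        have := ih (by omega)
        rw [show -((m + 1 : Nat) : Int) - 1 + 1 = -(m : Int) - 1 by push_cast; ring]
        exact this

-- B's slice, rewritten as a drop
lemma alt_nonneg (tp : String) (k : Int) (h : -1 ≤ k) :
    incearca_alt tp k = firstMatch tp (cuvinte.drop (k + 1).toNat) := by
  unfold incearca_alt
  rw [PySem.List.slice_from _ (by omega)]

lemma alt_neg (tp : String) (m : Nat) (h1 : 0 < m) (_h2 : m ≤ 32) :
    incearca_alt tp (-(m : Int) - 1) = firstMatch tp (cuvinte.drop (32 - m)) := by
  unfold incearca_alt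
  rw [show -(m : Int) - 1 + 1 = -(m : Int) by ring]
  rw [PySem.List.slice_from_neg_natCast _ _ h1, cuvinte_len]

lemma alt_below (tp : String) (k : Int) (h : k < -33) :
    incearca_alt tp k = firstMatch tp cuvinte := by
  unfold incearca_alt
  rw [PySem.List.slice_some_none]
  have : PySem.List.clampIdx cuvinte.length (k + 1) = 0 := by
    unfold PySem.List.clampIdx
    rw [cuvinte_len]
    split_ifs <;> omega
  rw [this, List.drop_zero]

lemma final_not_mem : "Final" ∉ cuvinte := by decide

-- ===== VERDICT (by name: the statements are the Claim_ definitions above) =====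
theorem incearca_spec : Claim_unchanged_incearca := by
  intro tp k _
  unfold Spec_incearca
  intro hD
  unfold D_incearca at hD
  by_cases hk : -1 ≤ k
  · -- nonnegative start: A and B agree unconditionally
    by_cases hub : k + 1 ≤ 32
    · have hA := incearca_nonneg tp (k + 1).toNat (by omega)
      rw [show (((k + 1).toNat : Int)) - 1 = k by omega] at hA
      rw [hA, alt_nonneg tp k hk]
    · -- start past the end: both "Final"
      have hA : incearca tp k = "Final" := by
        rw [incearca]
        split
        · rfl
        · next heq =>
          exfalso
          have : PySem.List.pyGet? cuvinte (k + 1) = none := by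
            rw [PySem.List.pyGet?_eq_none_iff]
            intro hr
            rw [cuvinte_len] at hr
            rcases hr with ⟨hlo, hhi⟩
            omega
          rw [this] at heq
          exact absurd heq (by simp)
      have hB : incearca_alt tp k = "Final" := by
        rw [alt_nonneg tp k hk]
        have : cuvinte.drop (k + 1).toNat = [] := by
          apply List.drop_eq_nil_of_le
          rw [cuvinte_len]
          omega
        rw [this]; rfl
      rw [hA, hB]
  · by_cases hmatch : ∃ w ∈ cuvinte, PySem.Str.isIn w tp = true
    · -- some keyword matches; ¬D_ forces -33 ≤ k and a match inside the wrapped tail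
      have hnR : ¬(k < -33 ∨ ∀ w ∈ cuvinte.drop (33 + k).toNat, PySem.Str.isIn w tp = false) :=
        fun hR => hD ⟨by omega, hmatch, hR⟩
      push Not at hnR
      obtain ⟨h33, w, hw, hwne⟩ := hnR
      have hwin : PySem.Str.isIn w tp = true := by
        cases hb : PySem.Str.isIn w tp
        · exact absurd hb hwne
        · rfl
      set m : Nat := (-(k + 1)).toNat with hm
      have hmk : k = -(m : Int) - 1 := by omega
      have hm1 : 0 < m := by omega
      have hm2 : m ≤ 32 := by omega
      have htail : (33 + k).toNat = 32 - m := by omega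
      rw [htail] at hw
      rw [hmk, incearca_neg tp m hm2, alt_neg tp m hm1 hm2]
      have hmatch' : ∃ x ∈ cuvinte.drop (32 - m), PySem.Str.isIn x tp = true := ⟨w, hw, hwin⟩
      rw [fmD_irrel tp _ "Final" _ hmatch', ← fm_eq_fmD]
    · -- no keyword occurs in tp at all: both sides are "Final"
      have hall : ∀ w ∈ cuvinte, PySem.Str.isIn w tp = false := by
        intro w hw
        by_contra hc
        exact hmatch ⟨w, hw, by simpa using hc⟩
      have hfullF : firstMatch tp cuvinte = "Final" := by
        rw [fm_eq_fmD]; exact fmD_none tp _ _ hall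
      by_cases h33 : -33 ≤ k
      · set m : Nat := (-(k + 1)).toNat with hm
        have hmk : k = -(m : Int) - 1 := by omega
        have hm1 : 0 < m := by omega
        have hm2 : m ≤ 32 := by omega
        rw [hmk, incearca_neg tp m hm2, alt_neg tp m hm1 hm2]
        rw [fmD_none tp _ _ (fun w hw => hall w (List.mem_of_mem_drop hw)), hfullF]
        rw [fm_eq_fmD, fmD_none tp _ _ (fun w hw => hall w (List.mem_of_mem_drop hw))]
      · -- k < -33: A raises IndexError at once ("Final"); B scans the full list, no match
        have hA : incearca tp k = "Final" := by
          rw [incearca]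
          split
          · rfl
          · next heq =>
            exfalso
            have : PySem.List.pyGet? cuvinte (k + 1) = none := by
              rw [PySem.List.pyGet?_eq_none_iff]
              intro hr
              rw [cuvinte_len] at hr
              rcases hr with ⟨hlo, hhi⟩
              omega
            rw [this] at heq
            exact absurd heq (by simp)
        rw [hA, alt_below tp k (by omega), hfullF]

theorem incearca_changed : Claim_changed_incearca := by
  unfold Claim_changed_incearca
  refine ⟨by decide, by decide, ?_, by decide, by decide⟩
  show incearca "Regnul" (-2) = "Regnul"
  have h := incearca_neg "Regnul" 1 (by omega)
  norm_num at h
  rw [h]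
  decide

theorem incearca_tight : Claim_exact_incearca := by
  intro tp k _ hD
  rcases hD with ⟨hk, ⟨w, hw, hwin⟩, hcond⟩
  by_cases h33 : -33 ≤ k
  · rcases hcond with h | htail
    · omega
    · set m : Nat := (-(k + 1)).toNat with hm
      have hmk : k = -(m : Int) - 1 := by omega
      have hm1 : 0 < m := by omega
      have hm2 : m ≤ 32 := by omega
      have htail' : ∀ x ∈ cuvinte.drop (32 - m), PySem.Str.isIn x tp = false := by
        intro x hx
        have : (33 + k).toNat = 32 - m := by omega
        rw [← this] at hx
        exact htail x hx
      have hA : incearca tp k = firstMatch tp cuvinte := by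
        rw [hmk, incearca_neg tp m hm2, fmD_none tp _ _ htail']
      have hB : incearca_alt tp k = "Final" := by
        rw [hmk, alt_neg tp m hm1 hm2, fm_eq_fmD, fmD_none tp _ _ htail']
      rw [hA, hB]
      intro hc
      have hmem : firstMatch tp cuvinte ∈ cuvinte := by
        rw [fm_eq_fmD]
        exact fmD_mem tp _ _ ⟨w, hw, hwin⟩
      rw [hc] at hmem
      exact final_not_mem hmem
  · have hA : incearca tp k = "Final" := by
      rw [incearca]
      split
      · rfl
      · next heq =>
        exfalso
        have : PySem.List.pyGet? cuvinte (k + 1) = none := by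
          rw [PySem.List.pyGet?_eq_none_iff]
          intro hr
          rw [cuvinte_len] at hr
          rcases hr with ⟨hlo, hhi⟩
          omega
        rw [this] at heq
        exact absurd heq (by simp)
    have hB : incearca_alt tp k = firstMatch tp cuvinte := alt_below tp k (by omega)
    rw [hA, hB]
    intro hc
    have hmem : firstMatch tp cuvinte ∈ cuvinte := by
      rw [fm_eq_fmD]
      exact fmD_mem tp _ _ ⟨w, hw, hwin⟩
    rw [← hc] at hmem
    exact final_not_mem hmem
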